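-- pv_equiv track=rewrite | github.com/Baio0/Zetero_Roamresearch_markdown | Roam_convert.py | bound_find
-- ===== SOURCE A (Python) =====
-- def Str_findall(text,Str,begin=0,end=None):
--     if end==None:
--         end=len(text)
--     K=[]
--     loc=text.find(Str,begin,end)
--     while loc!=-1:
--         K.append(loc)
--         begin=loc+len(Str)
--         loc=text.find(Str,begin,end)
--     return K
--
-- def In_Structure_check(text,loc,Struc=['[',']']):
--     if Struc[0]!=Struc[1]:
--         loc0=text.rfind(Struc[0],0,loc)
--         if loc0!=-1 and Struc[1] in text[loc0:loc]:
--             return False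
--         elif loc0!=-1 and Struc[1] not in text[loc0:loc]:
--             return True
--         elif loc0==-1:
--             return False
--
--     elif Struc[0]==Struc[1]:
--         #get the occurence of one string
--         occ_num=len(Str_findall(text,Struc[0],0,loc))
--         if occ_num%2 ==0: #even number
--             return False
--         else:
--             return True
--
-- def bound_find(obj,Struc=['[',']'],bound_str=':'):
--     bound=obj.find(bound_str)
--     if bound!=-1:
--         while bound!=-1:
--             if not In_Structure_check(obj,bound,Struc):
--                 return bound
--             else:
--                 bound=obj.find(bound_str,bound+len(bound_str))
--         bound=-1
--         return bound
-- ===== SOURCE B (Python) =====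
-- def bound_find(obj, Struc=['[', ']'], bound_str=':'):
--     # Single left-to-right scan: bracket state is updated incrementally per
--     # position instead of re-scanning the prefix for every candidate.
--     if obj.find(bound_str) == -1:
--         return None
--     op, cl = Struc[0], Struc[1]
--     n = len(obj)
--     lo, lc, lb = len(op), len(cl), len(bound_str)
--     nb = 0  # next position at which a delimiter candidate may start
--     if op != cl:
--         mo = mc = -1  # latest open/close occurrence start whose end <= p
--         for p in range(n + 1):
--             if lo <= p and obj.startswith(op, p - lo):
--                 mo = p - lo
--             if lc <= p and obj.startswith(cl, p - lc):
--                 mc = p - lc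
--             if nb <= p and obj.startswith(bound_str, p):
--                 if mo >= 0 and mc < mo:
--                     nb = p + lb  # inside brackets: skip this candidate
--                 else:
--                     return p
--         return -1
--     else:
--         par = False  # parity of greedy matches of op completed so far
--         pe = -1      # end of the greedy match currently in progress
--         for p in range(n + 1):
--             if pe == p:
--                 par = not par
--                 pe = -1
--             if pe == -1 and obj.startswith(op, p):
--                 pe = p + lo
--             if nb <= p and obj.startswith(bound_str, p):
--                 if par:
--                     nb = p + lb
--                 else:
--                     return p
--         return -1
-- ===== Notes on version B (the rewrite author's own statement) =====
-- stated objective: alternative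
-- what changed: A re-scans the whole prefix for every delimiter candidate (rfind / greedy occurrence count from position 0); B makes one left-to-right scan over positions, updating latest-open/latest-close starts (resp. greedy-match parity) incrementally and classifying each delimiter candidate from that running state.
import Mathlib
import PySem

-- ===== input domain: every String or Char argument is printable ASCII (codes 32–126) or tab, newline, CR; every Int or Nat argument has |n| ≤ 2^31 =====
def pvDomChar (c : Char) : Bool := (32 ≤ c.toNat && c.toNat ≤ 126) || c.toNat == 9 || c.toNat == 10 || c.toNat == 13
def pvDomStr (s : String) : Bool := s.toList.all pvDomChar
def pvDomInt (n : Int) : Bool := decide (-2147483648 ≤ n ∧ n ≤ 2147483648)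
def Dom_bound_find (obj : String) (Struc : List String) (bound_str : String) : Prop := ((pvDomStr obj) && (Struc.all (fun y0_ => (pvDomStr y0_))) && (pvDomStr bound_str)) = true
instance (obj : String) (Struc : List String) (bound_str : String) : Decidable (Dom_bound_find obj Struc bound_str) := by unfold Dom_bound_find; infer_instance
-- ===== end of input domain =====

-- B replaces A's per-candidate prefix re-scan by a single incremental left-to-right scan
-- (alternative algorithm; equal return value proved on Pre_).

-- ===== PORT A =====
-- Str_findall's while loop, ported with fuel (text.length + 1 suffices on every input
-- admitted by Pre_; each found location advances begin by at least 1 there).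
def findallGo (text S : List Char) (e : Int) : Nat → Int → List Int → List Int
  | 0, _, K => K
  | fuel+1, b, K =>
    let loc := PySem.Chars.findFrom text S b (some e)
    if loc = -1 then K else findallGo text S e fuel (loc + S.length) (K ++ [loc])

def strFindall (text S : List Char) (b e : Int) : List Int := findallGo text S e (text.length + 1) b []

-- In_Structure_check; Struc[0]/Struc[1] are read with a default, Pre_ excludes the
-- inputs on which Python would raise IndexError here.
def inStrucCheck (text : List Char) (loc : Int) (Struc : List String) : Bool :=
  let s0 := (PySem.List.pyGetD Struc 0 "").toList
  let s1 := (PySem.List.pyGetD Struc 1 "").toList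
  if s0 ≠ s1 then
    let loc0 := PySem.Chars.rfindFrom text s0 0 (some loc)
    if loc0 ≠ -1 && PySem.Chars.isIn s1 (PySem.List.slice text (some loc0) (some loc)) then false
    else if loc0 ≠ -1 && !(PySem.Chars.isIn s1 (PySem.List.slice text (some loc0) (some loc))) then true
    else false
  else
    decide ((strFindall text s0 0 loc).length % 2 ≠ 0)

-- bound_find's while loop, ported with fuel (text.length + 2 suffices on Pre_).
def boundGo (text bs : List Char) (Struc : List String) : Nat → Int → Option Int
  | 0, _ => some (-1)
  | fuel+1, bound =>
    if bound ≠ -1 then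
      if !(inStrucCheck text bound Struc) then some bound
      else boundGo text bs Struc fuel (PySem.Chars.findFrom text bs (bound + bs.length) none)
    else some (-1)

def bound_find (obj : String) (Struc : List String) (bound_str : String) : Option Int :=
  let t := obj.toList
  let bs := bound_str.toList
  let bound := PySem.Chars.find t bs
  if bound ≠ -1 then boundGo t bs Struc (t.length + 2) bound else none

-- ===== PORT B =====
-- single scan, o ≠ c case: mo/mc = start of the latest open/close occurrence ending ≤ p
-- (obj.startswith(x, i) for 0 ≤ i ≤ len(obj) is exactly x.isPrefixOf (t.drop i)).
def scanNe (t o c b : List Char) : Nat → Nat → Int → Int → Nat → Option Int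
  | 0, _, _, _, _ => some (-1)
  | k+1, p, mo, mc, nb =>
    let mo' := if o.length ≤ p && o.isPrefixOf (t.drop (p - o.length)) then ((p - o.length : Nat) : Int) else mo
    let mc' := if c.length ≤ p && c.isPrefixOf (t.drop (p - c.length)) then ((p - c.length : Nat) : Int) else mc
    if nb ≤ p && b.isPrefixOf (t.drop p) then
      if decide (0 ≤ mo') && decide (mc' < mo') then
        scanNe t o c b k (p+1) mo' mc' (p + b.length)
      else some (p : Int)
    else scanNe t o c b k (p+1) mo' mc' nb

-- single scan, o = c case: par = parity of completed greedy matches, pe = end of the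
-- greedy match currently in progress (-1 if none).
def scanEq (t o b : List Char) : Nat → Nat → Bool → Int → Nat → Option Int
  | 0, _, _, _, _ => some (-1)
  | k+1, p, par, pe, nb =>
    let par1 := if pe = (p : Int) then !par else par
    let pe1 := if pe = (p : Int) then -1 else pe
    let pe2 := if pe1 = -1 && o.isPrefixOf (t.drop p) then ((p + o.length : Nat) : Int) else pe1
    if nb ≤ p && b.isPrefixOf (t.drop p) then
      if par1 then scanEq t o b k (p+1) par1 pe2 (p + b.length)
      else some (p : Int)
    else scanEq t o b k (p+1) par1 pe2 nb

def bound_find_alt (obj : String) (Struc : List String) (bound_str : String) : Option Int :=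
  let t := obj.toList
  let bs := bound_str.toList
  if PySem.Chars.find t bs = -1 then none
  else
    let o := (PySem.List.pyGetD Struc 0 "").toList
    let c := (PySem.List.pyGetD Struc 1 "").toList
    if o ≠ c then scanNe t o c bs (t.length + 1) 0 (-1) (-1) 0
    else scanEq t o bs (t.length + 1) 0 false (-1) 0

-- ===== PRECONDITION & SPEC =====
-- Pre_ excludes exactly the inputs where A does not return: when a delimiter occurs,
-- Struc must have two elements (else Python raises IndexError) and must not have an
-- empty Struc[0] together with an empty bound_str or an empty Struc[1] (there A's
-- find/Str_findall loops never advance and A loops forever).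
def Pre_bound_find (obj : String) (Struc : List String) (bound_str : String) : Prop :=
  PySem.Str.find obj bound_str = -1 ∨
    (2 ≤ Struc.length ∧
      (PySem.List.pyGetD Struc 0 "" ≠ "" ∨
        (bound_str ≠ "" ∧ PySem.List.pyGetD Struc 1 "" ≠ "")))
instance (obj : String) (Struc : List String) (bound_str : String) : Decidable (Pre_bound_find obj Struc bound_str) := by unfold Pre_bound_find; infer_instance

def pvWitness_bound_find : String × List String × String := ("a[b:c]:d", ["[", "]"], ":")

def Spec_bound_find (obj : String) (Struc : List String) (bound_str : String) (out : Option Int) : Prop := out = bound_find_alt obj Struc bound_str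
instance (obj : String) (Struc : List String) (bound_str : String) (out : Option Int) : Decidable (Spec_bound_find obj Struc bound_str out) := by unfold Spec_bound_find; infer_instance

-- ===== CLAIM (what is proved, stated in full; the proofs are below) =====
def Claim_equal_bound_find : Prop := ∀ (obj : String) (Struc : List String) (bound_str : String), Dom_bound_find obj Struc bound_str → Pre_bound_find obj Struc bound_str → Spec_bound_find obj Struc bound_str (bound_find obj Struc bound_str)

-- ===== LEMMAS AND PROOFS =====

-- ---- window / occurrence basics -------------------------------------------------

-- occurrence of x at position i inside the prefix t[:e], for i ≤ e
theorem pvPrefixDropTake (t x : List Char) (i e : Nat) (hie : i ≤ e) :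
    x <+: (t.take e).drop i ↔ x <+: t.drop i ∧ i + x.length ≤ e := by
  rw [List.drop_take, List.prefix_take_iff]
  constructor
  · rintro ⟨h1, h2⟩; exact ⟨h1, by omega⟩
  · rintro ⟨h1, h2⟩; exact ⟨h1, by omega⟩

theorem pvOccEnd (t x : List Char) (q : Nat) (hx : x ≠ []) (h : x <+: t.drop q) :
    q + x.length ≤ t.length := by
  have h1 := h.length_le
  have h2 : (t.drop q).length = t.length - q := List.length_drop ..
  have h3 : 0 < x.length := List.length_pos_iff.mpr hx
  by_cases hq : q ≤ t.length
  · omega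
  · exfalso
    have : t.drop q = [] := List.drop_eq_nil_of_le (by omega)
    rw [this] at h
    exact hx (List.prefix_nil.mp h)

theorem pvInfixIffDrop (x s : List Char) : x <:+: s ↔ ∃ j, x <+: s.drop j := by
  rw [← PySem.Chars.isIn_iff_infix, ← PySem.Chars.exists_prefix_drop_iff_isIn]

-- ---- rfind characterisation -----------------------------------------------------

theorem pvRfindGoSpec (s x : List Char) (j : Nat) :
    (PySem.Chars.rfind.go s x j = -1 ∧ ∀ i, i ≤ j → ¬ x <+: s.drop i) ∨
    (∃ k : Nat, PySem.Chars.rfind.go s x j = (k : Int) ∧ k ≤ j ∧ x <+: s.drop k ∧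
      ∀ i, i ≤ j → k < i → ¬ x <+: s.drop i) := by
  induction j with
  | zero =>
    by_cases h : x.isPrefixOf (s.drop 0)
    · right
      refine ⟨0, ?_, le_refl _, List.isPrefixOf_iff_prefix.mp h, ?_⟩
      · rw [List.drop_zero] at h
        simp [PySem.Chars.rfind.go, h]
      · intro i h1 h2; omega
    · left
      constructor
      · rw [List.drop_zero] at h
        simp [PySem.Chars.rfind.go, Bool.eq_false_iff.mpr h]
      · intro i hi
        interval_cases i
        intro hc
        exact h (List.isPrefixOf_iff_prefix.mpr hc)
  | succ j ih =>
    by_cases h : x.isPrefixOf (s.drop (j+1))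
    · right
      refine ⟨j+1, ?_, le_refl _, List.isPrefixOf_iff_prefix.mp h, ?_⟩
      · simp [PySem.Chars.rfind.go, h]
      · intro i h1 h2; omega
    · have hgo : PySem.Chars.rfind.go s x (j+1) = PySem.Chars.rfind.go s x j := by
        simp [PySem.Chars.rfind.go, h]
      rcases ih with ⟨h1, h2⟩ | ⟨k, h1, h2, h3, h4⟩
      · left
        refine ⟨by rw [hgo]; exact h1, ?_⟩
        intro i hi
        rcases Nat.lt_or_ge i (j+1) with hlt | hge
        · exact h2 i (by omega)
        · have : i = j + 1 := by omega
          subst this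
          intro hc; exact h (List.isPrefixOf_iff_prefix.mpr hc)
      · right
        refine ⟨k, by rw [hgo]; exact h1, by omega, h3, ?_⟩
        intro i hi hki
        rcases Nat.lt_or_ge i (j+1) with hlt | hge
        · exact h4 i (by omega) hki
        · have : i = j + 1 := by omega
          subst this
          intro hc; exact h (List.isPrefixOf_iff_prefix.mpr hc)

theorem pvRfindFromEval (t x : List Char) (e : Nat) (he : e ≤ t.length) :
    PySem.Chars.rfindFrom t x 0 (some (e : Int)) = PySem.Chars.rfind (t.take e) x := by
  simp only [PySem.Chars.rfindFrom]
  split_ifs <;>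
    simp only [Int.toNat_natCast, Int.toNat_zero, List.drop_zero, zero_add] at * <;>
    omega

theorem pvRfindTakeSpec (t x : List Char) (e : Nat) (he : e ≤ t.length) :
    (PySem.Chars.rfind (t.take e) x = -1 ∧ ∀ i : Nat, i + x.length ≤ e → ¬ x <+: t.drop i) ∨
    (∃ k : Nat, PySem.Chars.rfind (t.take e) x = (k : Int) ∧ x <+: t.drop k ∧ k + x.length ≤ e ∧
      ∀ i : Nat, x <+: t.drop i → i + x.length ≤ e → i ≤ k) := by
  have hlen : (t.take e).length = e := by simp; omega
  have hrw : PySem.Chars.rfind (t.take e) x = PySem.Chars.rfind.go (t.take e) x e := by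
    rw [PySem.Chars.rfind, hlen]
  have hocc : ∀ i : Nat, i ≤ e → (x <+: (t.take e).drop i ↔ x <+: t.drop i ∧ i + x.length ≤ e) :=
    fun i hi => pvPrefixDropTake t x i e hi
  rcases pvRfindGoSpec (t.take e) x e with ⟨h1, h2⟩ | ⟨k, h1, h2, h3, h4⟩
  · left
    refine ⟨by rw [hrw]; exact h1, ?_⟩
    intro i hie hc
    exact h2 i (by omega) ((hocc i (by omega)).mpr ⟨hc, hie⟩)
  · right
    rcases (hocc k h2).mp h3 with ⟨h5, h6⟩
    refine ⟨k, by rw [hrw]; exact h1, h5, h6, ?_⟩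
    intro i hi hie
    by_contra hki
    exact h4 i (by omega) (by omega) ((hocc i (by omega)).mpr ⟨hi, hie⟩)

theorem pvRfindFromMax (t x : List Char) (e q : Nat) (he : e ≤ t.length)
    (hq : x <+: t.drop q) (hqe : q + x.length ≤ e)
    (hmax : ∀ r : Nat, x <+: t.drop r → r + x.length ≤ e → r ≤ q) :
    PySem.Chars.rfindFrom t x 0 (some (e : Int)) = (q : Int) := by
  rw [pvRfindFromEval t x e he]
  rcases pvRfindTakeSpec t x e he with ⟨h1, h2⟩ | ⟨k, h1, h2, h3, h4⟩
  · exact absurd hq (h2 q hqe)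
  · rw [h1]
    have := hmax k h2 h3
    have := h4 q hq hqe
    congr 1
    omega

theorem pvRfindFromNone (t x : List Char) (e : Nat) (he : e ≤ t.length)
    (h : ∀ q : Nat, q + x.length ≤ e → ¬ x <+: t.drop q) :
    PySem.Chars.rfindFrom t x 0 (some (e : Int)) = -1 := by
  rw [pvRfindFromEval t x e he]
  rcases pvRfindTakeSpec t x e he with ⟨h1, _⟩ | ⟨k, h1, h2, h3, _⟩
  · exact h1
  · exact absurd h2 (h k h3)

-- ---- forward find characterisation ----------------------------------------------

theorem pvFindFromEval (t x : List Char) (st e : Nat) (he : e ≤ t.length) (hse : st ≤ e) :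
    PySem.Chars.findFrom t x (st : Int) (some (e : Int)) =
      (if PySem.Chars.find ((t.take e).drop st) x = -1 then -1
       else (st : Int) + PySem.Chars.find ((t.take e).drop st) x) := by
  simp only [PySem.Chars.findFrom]
  split_ifs <;>
    simp only [Int.toNat_natCast, Int.toNat_zero, List.drop_zero, zero_add] at * <;>
    omega

theorem pvFindFromNoneEval (t x : List Char) (st : Nat) :
    PySem.Chars.findFrom t x (st : Int) none =
      PySem.Chars.findFrom t x (st : Int) (some (t.length : Int)) := by
  simp only [PySem.Chars.findFrom]
  split_ifs <;> simp_all <;> omega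

-- first occurrence of x at or after st whose end lies within t[:e]
theorem pvFindFromSomeEq (t x : List Char) (st e q : Nat) (he : e ≤ t.length)
    (hst : st ≤ q) (hq : x <+: t.drop q) (hqe : q + x.length ≤ e)
    (hmin : ∀ r : Nat, st ≤ r → r < q → ¬ x <+: t.drop r) :
    PySem.Chars.findFrom t x (st : Int) (some (e : Int)) = (q : Int) := by
  have hse : st ≤ e := by omega
  rw [pvFindFromEval t x st e he hse]
  set w := (t.take e).drop st with hw
  have hwin : ∀ j : Nat, st + j ≤ e → (x <+: w.drop j ↔ x <+: t.drop (st + j) ∧ st + j + x.length ≤ e) := by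
    intro j hj
    rw [hw, List.drop_drop]
    exact pvPrefixDropTake t x (st + j) e hj
  have hwlen : w.length = e - st := by simp [hw]; omega
  have hqw : x <+: w.drop (q - st) := by
    rw [(hwin (q - st) (by omega))]
    constructor
    · have : st + (q - st) = q := by omega
      rw [this]; exact hq
    · omega
  have hne : PySem.Chars.find w x ≠ -1 := by
    rw [PySem.Chars.find_ne_neg_one_iff, pvInfixIffDrop]
    exact ⟨q - st, hqw⟩
  have hge : 0 ≤ PySem.Chars.find w x := by
    have := PySem.Chars.neg_one_le_find w x; omega
  rcases PySem.Chars.find_spec hge with ⟨hf1, hf2⟩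
  have hfl : PySem.Chars.find w x ≤ (w.length : Int) := PySem.Chars.find_le_length w x
  set j : Nat := (PySem.Chars.find w x).toNat with hj
  have hjle : j ≤ e - st := by omega
  have hjocc : x <+: t.drop (st + j) ∧ st + j + x.length ≤ e := (hwin j (by omega)).mp hf1
  have hjq : ¬ (st + j < q) := by
    intro hlt
    exact hmin (st + j) (by omega) hlt hjocc.1
  have hqj : ¬ (q - st < j) := by
    intro hlt
    exact hf2 (q - st) (by omega) hqw
  have : st + j = q := by omega
  rw [if_neg hne]
  omega

theorem pvFindFromSomeNone (t x : List Char) (st e : Nat) (he : e ≤ t.length)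
    (h : ∀ q : Nat, st ≤ q → q + x.length ≤ e → ¬ x <+: t.drop q) :
    PySem.Chars.findFrom t x (st : Int) (some (e : Int)) = -1 := by
  by_cases hse : st ≤ e
  · rw [pvFindFromEval t x st e he hse]
    set w := (t.take e).drop st with hw
    have hfe : PySem.Chars.find w x = -1 := by
      rw [PySem.Chars.find_eq_neg_one_iff, pvInfixIffDrop]
      rintro ⟨j, hj⟩
      by_cases hjw : st + j ≤ e
      · rw [hw, List.drop_drop] at hj
        rcases (pvPrefixDropTake t x (st + j) e hjw).mp hj with ⟨h1, h2⟩
        exact h (st + j) (by omega) h2 h1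
      · have hwd : w.drop j = [] := by
          apply List.drop_eq_nil_of_le
          have : w.length = e - st := by simp [hw]; omega
          omega
        rw [hwd] at hj
        have hx : x = [] := List.prefix_nil.mp hj
        exact h e (by omega) (by simp [hx]) (by simp [hx])
    rw [hfe]; simp
  · simp only [PySem.Chars.findFrom]
    split_ifs <;> omega


-- ---- unequal-bracket state invariant --------------------------------------------

-- m is the start of the rightmost occurrence of x in t whose end is < P (-1 if none)
def LastInv (t x : List Char) (P : Nat) (m : Int) : Prop :=
  (m = -1 ∧ ∀ s : Nat, x <+: t.drop s → ¬ (s + x.length < P)) ∨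
  (∃ s : Nat, m = (s : Int) ∧ x <+: t.drop s ∧ s + x.length < P ∧
    ∀ s' : Nat, x <+: t.drop s' → s' + x.length < P → s' ≤ s)

theorem pvLastInvZero (t x : List Char) : LastInv t x 0 (-1) :=
  Or.inl ⟨rfl, fun _ _ h => by omega⟩

theorem pvLastInvStep (t x : List Char) (p : Nat) (m : Int) (h : LastInv t x p m) :
    LastInv t x (p+1)
      (if x.length ≤ p && x.isPrefixOf (t.drop (p - x.length)) then ((p - x.length : Nat) : Int) else m) := by
  by_cases hc : (x.length ≤ p && x.isPrefixOf (t.drop (p - x.length))) = true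
  · rw [if_pos hc]
    simp only [Bool.and_eq_true, decide_eq_true_eq] at hc
    right
    refine ⟨p - x.length, rfl, List.isPrefixOf_iff_prefix.mp hc.2, by omega, ?_⟩
    intro s' _ hs'
    omega
  · rw [if_neg hc]
    simp only [Bool.and_eq_true, decide_eq_true_eq, not_and] at hc
    have hnew : ∀ s : Nat, x <+: t.drop s → s + x.length ≠ p := by
      intro s hs hsp
      have hxl : x.length ≤ p := by omega
      have hse : s = p - x.length := by omega
      subst hse
      exact absurd (List.isPrefixOf_iff_prefix.mpr hs) (by simpa using hc hxl)
    rcases h with ⟨h1, h2⟩ | ⟨s, h1, h2, h3, h4⟩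
    · left
      refine ⟨h1, ?_⟩
      intro s hs hlt
      have := hnew s hs
      exact h2 s hs (by omega)
    · right
      refine ⟨s, h1, h2, by omega, ?_⟩
      intro s' hs' hlt
      have := hnew s' hs'
      exact h4 s' hs' (by omega)

theorem pvIsInSlice (t c : List Char) (s p : Nat) (hsp : s ≤ p) (mc : Int)
    (hmc : LastInv t c (p+1) mc) :
    PySem.Chars.isIn c (PySem.List.slice t (some (s : Int)) (some (p : Int))) = decide ((s : Int) ≤ mc) := by
  rw [PySem.List.slice_natCast]
  set w := (t.drop s).take (p - s) with hw
  have hwin : ∀ j : Nat, j ≤ p - s → (c <+: w.drop j ↔ c <+: t.drop (s + j) ∧ s + j + c.length ≤ p) := by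
    intro j hj
    rw [hw]
    have := pvPrefixDropTake (t.drop s) c j (p - s) hj
    rw [this, List.drop_drop]
    constructor
    · rintro ⟨h1, h2⟩; exact ⟨h1, by omega⟩
    · rintro ⟨h1, h2⟩; exact ⟨h1, by omega⟩
  by_cases hle : (s : Int) ≤ mc
  · have : PySem.Chars.isIn c w = true := by
      rcases hmc with ⟨h1, _⟩ | ⟨sc, h1, h2, h3, _⟩
      · omega
      · have hssc : s ≤ sc := by omega
        rw [← PySem.Chars.exists_prefix_drop_iff_isIn]
        refine ⟨sc - s, ?_⟩
        rw [hwin (sc - s) (by omega)]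
        have : s + (sc - s) = sc := by omega
        rw [this]
        exact ⟨h2, by omega⟩
    simp [this, hle]
  · have : PySem.Chars.isIn c w = false := by
      rw [← Bool.not_eq_true, ← PySem.Chars.exists_prefix_drop_iff_isIn]
      rintro ⟨j, hj⟩
      have hocc : ∃ u : Nat, s ≤ u ∧ c <+: t.drop u ∧ u + c.length ≤ p := by
        by_cases hjw : j ≤ p - s
        · rcases (hwin j hjw).mp hj with ⟨h1, h2⟩
          exact ⟨s + j, by omega, h1, by omega⟩
        · have hwd : w.drop j = [] := by
            apply List.drop_eq_nil_of_le
            have : w.length ≤ p - s := by rw [hw]; simp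
            omega
          rw [hwd] at hj
          have hcnil : c = [] := List.prefix_nil.mp hj
          exact ⟨p, hsp, by simp [hcnil], by simp [hcnil]⟩
      rcases hocc with ⟨u, hu0, hu1, hu2⟩
      rcases hmc with ⟨h1, h2⟩ | ⟨sc, h1, h2, h3, h4⟩
      · exact h2 u hu1 (by omega)
      · have := h4 u hu1 (by omega)
        omega
    simp [this, hle]

theorem pvChkNe (t : List Char) (Struc : List String) (p : Nat) (hp : p ≤ t.length)
    (o c : List Char) (ho : (PySem.List.pyGetD Struc 0 "").toList = o)
    (hc : (PySem.List.pyGetD Struc 1 "").toList = c) (hne : o ≠ c)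
    (mo mc : Int) (hmo : LastInv t o (p+1) mo) (hmc : LastInv t c (p+1) mc) :
    inStrucCheck t (p : Int) Struc = (decide ((0:Int) ≤ mo) && decide (mc < mo)) := by
  unfold inStrucCheck
  simp only [ho, hc]
  rw [if_pos hne]
  rcases hmo with ⟨h1, h2⟩ | ⟨s, h1, h2, h3, h4⟩
  · have hloc : PySem.Chars.rfindFrom t o 0 (some (p : Int)) = -1 := by
      apply pvRfindFromNone t o p hp
      intro q hq hocc
      exact h2 q hocc (by omega)
    subst h1
    simp [hloc]
  · have hloc : PySem.Chars.rfindFrom t o 0 (some (p : Int)) = (s : Int) := by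
      apply pvRfindFromMax t o p s hp h2 (by omega)
      intro r hr hre
      exact h4 r hr (by omega)
    have hIn := pvIsInSlice t c s p (by omega) mc hmc
    subst h1
    rw [hloc, hIn]
    by_cases hle : (s : Int) ≤ mc <;> simp [hle] <;> omega


-- ---- main loop alignment, unequal-bracket case ----------------------------------

theorem pvMainNe (t o c b : List Char) (Struc : List String)
    (ho : (PySem.List.pyGetD Struc 0 "").toList = o)
    (hc : (PySem.List.pyGetD Struc 1 "").toList = c)
    (hne : o ≠ c) (hob : b = [] → o ≠ []) :
    ∀ (k p : Nat) (mo mc : Int) (nb fA : Nat),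
      p + k = t.length + 1 →
      LastInv t o p mo → LastInv t c p mc →
      (∀ q : Nat, nb ≤ q → q < p → ¬ b <+: t.drop q) →
      (b = [] → nb = 0) →
      k + 1 ≤ fA →
      scanNe t o c b k p mo mc nb = boundGo t b Struc fA (PySem.Chars.findFrom t b (nb : Int) none) := by
  intro k
  induction k with
  | zero =>
    intro p mo mc nb fA hpk _ _ h3 _ hfA
    have hfind : PySem.Chars.findFrom t b (nb : Int) none = -1 := by
      rw [pvFindFromNoneEval]
      exact pvFindFromSomeNone t b nb t.length (le_refl _)
        (fun q hq hqe => h3 q hq (by omega))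
    obtain ⟨f, rfl⟩ : ∃ f, fA = f + 1 := ⟨fA - 1, by omega⟩
    rw [hfind]
    simp [scanNe, boundGo]
  | succ k ih =>
    intro p mo mc nb fA hpk hmo hmc h3 h5 hfA
    have hp : p ≤ t.length := by omega
    have hmo' := pvLastInvStep t o p mo hmo
    have hmc' := pvLastInvStep t c p mc hmc
    have hchk := pvChkNe t Struc p hp o c ho hc hne _ _ hmo' hmc'
    simp only [scanNe]
    generalize hMO : (if (decide (o.length ≤ p) && o.isPrefixOf (List.drop (p - o.length) t)) = true then ((p - o.length : Nat) : Int) else mo) = mo' at hmo' hchk ⊢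
    generalize hMC : (if (decide (c.length ≤ p) && c.isPrefixOf (List.drop (p - c.length) t)) = true then ((p - c.length : Nat) : Int) else mc) = mc' at hmc' hchk ⊢
    by_cases hcand : (decide (nb ≤ p) && b.isPrefixOf (t.drop p)) = true
    · have hcand' := hcand
      simp only [Bool.and_eq_true, decide_eq_true_eq] at hcand'
      obtain ⟨hnbp, hoccb0⟩ := hcand'
      have hoccb : b <+: t.drop p := List.isPrefixOf_iff_prefix.mp hoccb0
      have hple : p + b.length ≤ t.length := by
        by_cases hbnil : b = []
        · subst hbnil; simpa using hp
        · exact pvOccEnd t b p hbnil hoccb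
      have hfind : PySem.Chars.findFrom t b (nb : Int) none = (p : Int) := by
        rw [pvFindFromNoneEval]
        exact pvFindFromSomeEq t b nb t.length p (le_refl _) hnbp hoccb hple
          (fun r hr hrq => h3 r hr (by omega))
      obtain ⟨f, rfl⟩ : ∃ f, fA = f + 1 := ⟨fA - 1, by omega⟩
      rw [hfind]
      simp only [boundGo]
      rw [if_pos (by omega : ¬ ((p : Int) = -1)), hchk, if_pos hcand]
      by_cases hin : (decide ((0:Int) ≤ mo') && decide (mc' < mo')) = true
      · rw [if_pos hin]
        have hbne : b ≠ [] := by
          intro hbnil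
          have hnb0 : nb = 0 := h5 hbnil
          have hp0 : p = 0 := by
            by_contra hpne
            exact h3 0 (by omega) (by omega) (by simp [hbnil])
          rcases hmo' with ⟨h1, _⟩ | ⟨s, h1, hocc, hlen, _⟩
          · rw [h1] at hin
            simp at hin
          · have hlen0 : o.length = 0 := by omega
            exact hob hbnil (List.length_eq_zero_iff.mp hlen0)
        have hbpos : 0 < b.length := List.length_pos_iff.mpr hbne
        rw [if_neg (by rw [hin]; simp)]
        have hcast : ((p : Int) + (b.length : Int)) = ((p + b.length : Nat) : Int) := by push_cast; ring
        rw [hcast]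
        exact ih (p+1) _ _ (p + b.length) f (by omega) hmo' hmc'
          (fun q hq hq' => by intro _; omega)
          (fun hbnil => absurd hbnil hbne) (by omega)
      · rw [if_neg hin]
        rw [Bool.eq_false_iff.mpr hin]
        simp
    · rw [if_neg hcand]
      have h3' : ∀ q : Nat, nb ≤ q → q < p + 1 → ¬ b <+: t.drop q := by
        intro q hq hq'
        rcases Nat.lt_or_ge q p with hlt | hge
        · exact h3 q hq hlt
        · have hqp : q = p := by omega
          subst hqp
          intro hpre
          exact hcand (by simp [hq, List.isPrefixOf_iff_prefix.mpr hpre])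
      exact ih (p+1) _ _ nb fA (by omega) hmo' hmc' h3' h5 (by omega)


-- ---- equal-bracket (parity) machinery -------------------------------------------

-- first occurrence of x at or after position q (searched with explicit fuel)
def nextOccGo (t x : List Char) : Nat → Nat → Option Nat
  | 0, _ => none
  | f+1, q => if x.isPrefixOf (t.drop q) then some q else nextOccGo t x f (q+1)

def nextOcc (t x : List Char) (e : Nat) : Option Nat := nextOccGo t x (t.length + 1 - e) e

theorem pvNextOccGoSome (t x : List Char) : ∀ (f q r : Nat), nextOccGo t x f q = some r →
    q ≤ r ∧ r < q + f ∧ x <+: t.drop r ∧ ∀ j, q ≤ j → j < r → ¬ x <+: t.drop j := by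
  intro f
  induction f with
  | zero => intro q r h; simp [nextOccGo] at h
  | succ f ih =>
    intro q r h
    by_cases hc : x.isPrefixOf (t.drop q)
    · simp [nextOccGo, hc] at h
      subst h
      exact ⟨le_refl _, by omega, List.isPrefixOf_iff_prefix.mp hc, fun j h1 h2 => by omega⟩
    · simp [nextOccGo, hc] at h
      rcases ih (q+1) r h with ⟨h1, h2, h3, h4⟩
      refine ⟨by omega, by omega, h3, ?_⟩
      intro j hj1 hj2
      rcases Nat.lt_or_ge j (q+1) with hlt | hge
      · have : j = q := by omega
        subst this
        intro hpre
        exact hc (List.isPrefixOf_iff_prefix.mpr hpre)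
      · exact h4 j hge hj2

theorem pvNextOccGoNone (t x : List Char) : ∀ (f q : Nat), nextOccGo t x f q = none →
    ∀ j, q ≤ j → j < q + f → ¬ x <+: t.drop j := by
  intro f
  induction f with
  | zero => intro q _ j h1 h2; omega
  | succ f ih =>
    intro q h j h1 h2
    by_cases hc : x.isPrefixOf (t.drop q)
    · simp [nextOccGo, hc] at h
    · simp [nextOccGo, hc] at h
      rcases Nat.lt_or_ge j (q+1) with hlt | hge
      · have : j = q := by omega
        subst this
        intro hpre
        exact hc (List.isPrefixOf_iff_prefix.mpr hpre)
      · exact ih (q+1) h j hge (by omega)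

theorem pvNextOccSome (t x : List Char) (e r : Nat) (h : nextOcc t x e = some r) :
    e ≤ r ∧ r ≤ t.length ∧ x <+: t.drop r ∧ ∀ j, e ≤ j → j < r → ¬ x <+: t.drop j := by
  rcases pvNextOccGoSome t x _ e r h with ⟨h1, h2, h3, h4⟩
  exact ⟨h1, by omega, h3, h4⟩

theorem pvNextOccNone (t x : List Char) (e : Nat) (h : nextOcc t x e = none) :
    ∀ j, e ≤ j → j ≤ t.length → ¬ x <+: t.drop j := by
  intro j h1 h2
  exact pvNextOccGoNone t x _ e h j h1 (by omega)

theorem pvNextOccPast (t x : List Char) (e : Nat) (he : t.length + 1 ≤ e) :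
    nextOcc t x e = none := by
  unfold nextOcc
  have : t.length + 1 - e = 0 := by omega
  rw [this]
  rfl

theorem pvNextOccSelf (t x : List Char) (e : Nat) (he : e ≤ t.length) (h : x <+: t.drop e) :
    nextOcc t x e = some e := by
  unfold nextOcc
  have h1 : t.length + 1 - e = (t.length - e) + 1 := by omega
  rw [h1]
  simp [nextOccGo, List.isPrefixOf_iff_prefix.mpr h]

-- greedy (non-overlapping, leftmost) matches of x in t starting at or after e
def pvG (t x : List Char) (e : Nat) : List Nat :=
  if hx : x.isEmpty = true then [] else
    match h : nextOcc t x e with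
    | none => []
    | some q => q :: pvG t x (q + x.length)
termination_by t.length + 1 - e
decreasing_by
  have h1 := pvNextOccSome t x e q h
  have h2 : 0 < x.length := List.length_pos_iff.mpr (by simpa [List.isEmpty_iff] using hx)
  omega

theorem pvG_eq_none (t x : List Char) (e : Nat) (hx : x ≠ []) (h : nextOcc t x e = none) :
    pvG t x e = [] := by
  rw [pvG, dif_neg (by simpa [List.isEmpty_iff] using hx)]
  split
  · rfl
  · next q heq => rw [h] at heq; cases heq

theorem pvG_eq_some (t x : List Char) (e q : Nat) (hx : x ≠ []) (h : nextOcc t x e = some q) :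
    pvG t x e = q :: pvG t x (q + x.length) := by
  rw [pvG, dif_neg (by simpa [List.isEmpty_iff] using hx)]
  split
  · next heq => rw [h] at heq; cases heq
  · next q' heq =>
      rw [h] at heq
      injection heq with he
      rw [he]

theorem pvTakeWhileSplit {α : Type} (P : α → Bool) : ∀ (d r : List α),
    (∀ a ∈ d, P a = true) → (∀ hd, r.head? = some hd → P hd = false) →
    (d ++ r).takeWhile P = d := by
  intro d
  induction d with
  | nil =>
    intro r _ hr
    cases r with
    | nil => rfl
    | cons a r' => simp [List.takeWhile_cons, hr a rfl]
  | cons a d' ih =>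
    intro r hd hr
    rw [List.cons_append, List.takeWhile_cons, if_pos (by simp [hd a List.mem_cons_self]),
      ih r (fun a' ha' => hd a' (List.mem_cons_of_mem _ ha')) hr]

theorem pvGTakeLen (t x : List Char) (p : Nat) (hx : x ≠ []) :
    ∀ (m e : Nat), t.length + 1 - e ≤ m →
      (((pvG t x e).takeWhile (fun q => decide (q + x.length ≤ p))).length + e ≤ p ∨
       ((pvG t x e).takeWhile (fun q => decide (q + x.length ≤ p))).length = 0) := by
  intro m
  induction m with
  | zero =>
    intro e hm
    right
    rw [pvG_eq_none t x e hx (pvNextOccPast t x e (by omega))]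
    rfl
  | succ m ih =>
    intro e hm
    cases hno : nextOcc t x e with
    | none => right; rw [pvG_eq_none t x e hx hno]; rfl
    | some q =>
      rw [pvG_eq_some t x e q hx hno]
      rcases pvNextOccSome t x e q hno with ⟨h1, h2, h3, _⟩
      have hxl : 0 < x.length := List.length_pos_iff.mpr hx
      by_cases hqp : q + x.length ≤ p
      · simp only [List.takeWhile_cons, decide_eq_true_eq, if_pos hqp, List.length_cons]
        rcases ih (q + x.length) (by omega) with hle | h0
        · left; omega
        · left; rw [h0]; omega
      · right
        simp only [List.takeWhile_cons, decide_eq_true_eq, if_neg hqp]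
        rfl

theorem pvFindallG (t x : List Char) (p : Nat) (hx : x ≠ []) (hp : p ≤ t.length) :
    ∀ (f e : Nat) (K : List Int),
      ((pvG t x e).takeWhile (fun q => decide (q + x.length ≤ p))).length < f →
      findallGo t x (p : Int) f (e : Int) K =
        K ++ ((pvG t x e).takeWhile (fun q => decide (q + x.length ≤ p))).map (fun q => (q : Int)) := by
  intro f
  induction f with
  | zero => intro e K h; omega
  | succ f ih =>
    intro e K h
    have hxl : 0 < x.length := List.length_pos_iff.mpr hx
    cases hno : nextOcc t x e with
    | none =>
      have hG : pvG t x e = [] := pvG_eq_none t x e hx hno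
      have hfind : PySem.Chars.findFrom t x (e : Int) (some (p : Int)) = -1 := by
        apply pvFindFromSomeNone t x e p hp
        intro q hq hqe
        exact pvNextOccNone t x e hno q hq (by omega)
      simp [findallGo, hfind, hG]
    | some q =>
      rcases pvNextOccSome t x e q hno with ⟨h1, h2, h3, h4⟩
      have hG : pvG t x e = q :: pvG t x (q + x.length) := pvG_eq_some t x e q hx hno
      by_cases hqp : q + x.length ≤ p
      · have hfind : PySem.Chars.findFrom t x (e : Int) (some (p : Int)) = (q : Int) :=
          pvFindFromSomeEq t x e p q hp h1 h3 hqp h4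
        rw [hG] at h ⊢
        simp only [List.takeWhile_cons, decide_eq_true_eq, if_pos hqp, List.length_cons] at h ⊢
        simp only [findallGo, hfind]
        rw [if_neg (by omega : ¬ ((q : Int) = -1))]
        have hcast : ((q : Int) + (x.length : Int)) = ((q + x.length : Nat) : Int) := by push_cast; ring
        rw [hcast, ih (q + x.length) (K ++ [(q : Int)]) (by omega)]
        simp [List.append_assoc]
      · have hfind : PySem.Chars.findFrom t x (e : Int) (some (p : Int)) = -1 := by
          apply pvFindFromSomeNone t x e p hp
          intro r hr hre
          rcases Nat.lt_or_ge r q with hlt | hge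
          · exact h4 r hr hlt
          · intro _; omega
        rw [hG]
        simp only [List.takeWhile_cons, decide_eq_true_eq, if_neg hqp]
        simp [findallGo, hfind]

theorem pvStrFindallLen (t x : List Char) (p : Nat) (hx : x ≠ []) (hp : p ≤ t.length) :
    (strFindall t x 0 (p : Int)).length =
      ((pvG t x 0).takeWhile (fun q => decide (q + x.length ≤ p))).length := by
  unfold strFindall
  have hfuel : ((pvG t x 0).takeWhile (fun q => decide (q + x.length ≤ p))).length < t.length + 1 := by
    rcases pvGTakeLen t x p hx (t.length + 1) 0 (by omega) with hle | h0 <;> omega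
  have h0 : ((0 : Nat) : Int) = (0 : Int) := by norm_num
  rw [← h0, pvFindallG t x p hx hp (t.length + 1) 0 [] hfuel]
  simp

theorem pvLenSplit (t x : List Char) (p : Nat) (hx : x ≠ []) (hp : p ≤ t.length)
    (done1 rest1 : List Nat) (hsplit : pvG t x 0 = done1 ++ rest1)
    (hd : ∀ q ∈ done1, q + x.length ≤ p)
    (hr : ∀ hd', rest1.head? = some hd' → ¬ (hd' + x.length ≤ p)) :
    (strFindall t x 0 (p : Int)).length = done1.length := by
  rw [pvStrFindallLen t x p hx hp, hsplit,
    pvTakeWhileSplit _ done1 rest1 (fun a ha => by simp [hd a ha]) (fun h hh => by simp [hr h hh])]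

theorem pvParitySame (m : Nat) : decide (m % 2 ≠ 0) = decide (m % 2 = 1) := by
  rcases Nat.mod_two_eq_zero_or_one m with h | h <;> simp [h]

theorem pvParityFlip (m : Nat) : decide ((m + 1) % 2 ≠ 0) = !decide (m % 2 = 1) := by
  rcases Nat.mod_two_eq_zero_or_one m with h | h <;> simp [Nat.add_mod, h]

-- scan state for the equal-bracket case: par = parity of greedy matches completed
-- before position p, pe = end of the in-progress greedy match (-1 if none)
def EqInv (t x : List Char) (p : Nat) (par : Bool) (pe : Int) : Prop :=
  ∃ done rest, pvG t x 0 = done ++ rest ∧ (∀ q ∈ done, q + x.length < p) ∧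
    par = decide (done.length % 2 = 1) ∧
    ((pe = -1 ∧ ∃ e0, e0 ≤ p ∧ rest = pvG t x e0 ∧ ∀ r, e0 ≤ r → r < p → ¬ x <+: t.drop r) ∨
     (∃ q, pe = ((q + x.length : Nat) : Int) ∧ q < p ∧ p ≤ q + x.length ∧
       rest = q :: pvG t x (q + x.length)))

theorem pvEqInvZero (t x : List Char) : EqInv t x 0 false (-1) :=
  ⟨[], pvG t x 0, by simp, by simp, by simp,
    Or.inl ⟨rfl, 0, le_refl _, rfl, fun r _ h2 => by omega⟩⟩

theorem pvStepEq (t x : List Char) (p : Nat) (par : Bool) (pe : Int) (hx : x ≠ [])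
    (hp : p ≤ t.length) (hinv : EqInv t x p par pe) (par1 : Bool) (pe2 : Int)
    (hpar1 : (if pe = (p : Int) then !par else par) = par1)
    (hpe2 : (if (decide ((if pe = (p : Int) then -1 else pe) = -1) && x.isPrefixOf (t.drop p)) = true
        then ((p + x.length : Nat) : Int) else (if pe = (p : Int) then -1 else pe)) = pe2) :
    decide ((strFindall t x 0 (p : Int)).length % 2 ≠ 0) = par1 ∧ EqInv t x (p+1) par1 pe2 := by
  have hxl : 0 < x.length := List.length_pos_iff.mpr hx
  rcases hinv with ⟨done, rest, hsplit, hdone, hpar, hbr⟩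
  rcases hbr with ⟨hpe, e0, he0, hrest, hno⟩ | ⟨q, hpe, hqp, hple, hrest⟩
  · -- no match in progress
    have hpne : ¬ (pe = (p : Int)) := by rw [hpe]; omega
    rw [if_neg hpne] at hpar1 hpe2
    rw [hpe] at hpe2
    simp only [decide_eq_true_eq, if_pos rfl] at hpe2
    cases hnx : nextOcc t x e0 with
    | none =>
      have hrnil : rest = [] := by rw [hrest, pvG_eq_none t x e0 hx hnx]
      have hlen : (strFindall t x 0 (p : Int)).length = done.length := by
        apply pvLenSplit t x p hx hp done rest hsplit (fun q hq => by have := hdone q hq; omega)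
        intro hd' hh
        rw [hrnil] at hh
        simp at hh
      have hnoccp : ¬ x <+: t.drop p := pvNextOccNone t x e0 hnx p he0 hp
      have hpre : x.isPrefixOf (t.drop p) = false :=
        Bool.eq_false_iff.mpr (fun hc => hnoccp (List.isPrefixOf_iff_prefix.mp hc))
      rw [hpre] at hpe2
      simp at hpe2
      constructor
      · rw [hlen, ← hpar1, hpar, pvParitySame]
      · refine ⟨done, rest, hsplit, fun q hq => by have := hdone q hq; omega, by rw [← hpar1, hpar], ?_⟩
        left
        refine ⟨hpe2.symm, e0, by omega, hrest, ?_⟩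
        intro r h1 h2
        rcases Nat.lt_or_ge r p with hlt | hge
        · exact hno r h1 hlt
        · have : r = p := by omega
          subst this
          exact hnoccp
    | some q2 =>
      rcases pvNextOccSome t x e0 q2 hnx with ⟨hq1, hq2, hq3, hq4⟩
      have hq2p : p ≤ q2 := by
        by_contra hlt
        exact hno q2 hq1 (by omega) hq3
      have hrq : rest = q2 :: pvG t x (q2 + x.length) := by rw [hrest, pvG_eq_some t x e0 q2 hx hnx]
      have hlen : (strFindall t x 0 (p : Int)).length = done.length := by
        apply pvLenSplit t x p hx hp done rest hsplit (fun q' hq' => by have := hdone q' hq'; omega)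
        intro hd' hh
        rw [hrq] at hh
        simp at hh
        subst hh
        omega
      constructor
      · rw [hlen, ← hpar1, hpar, pvParitySame]
      · by_cases hocc : x.isPrefixOf (t.drop p)
        · have hoccp : x <+: t.drop p := List.isPrefixOf_iff_prefix.mp hocc
          have hpq2 : q2 = p := by
            by_contra hne'
            exact hq4 p he0 (by omega) hoccp
          rw [hocc] at hpe2
          simp at hpe2
          refine ⟨done, rest, hsplit, fun q' hq' => by have := hdone q' hq'; omega, by rw [← hpar1, hpar], ?_⟩
          right
          refine ⟨p, hpe2.symm, by omega, by omega, ?_⟩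
          rw [hrq, hpq2]
        · have hpre : x.isPrefixOf (t.drop p) = false := Bool.eq_false_iff.mpr hocc
          rw [hpre] at hpe2
          simp at hpe2
          refine ⟨done, rest, hsplit, fun q' hq' => by have := hdone q' hq'; omega, by rw [← hpar1, hpar], ?_⟩
          left
          refine ⟨hpe2.symm, e0, by omega, hrest, ?_⟩
          intro r h1 h2
          rcases Nat.lt_or_ge r p with hlt | hge
          · exact hno r h1 hlt
          · have : r = p := by omega
            subst this
            exact fun hc => hocc (List.isPrefixOf_iff_prefix.mpr hc)
  · -- match [q, q + |x|) in progress
    by_cases hqe : q + x.length = p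
    · have hpeq : pe = (p : Int) := by rw [hpe, hqe]
      rw [if_pos hpeq] at hpar1 hpe2
      simp only [decide_eq_true_eq, if_pos rfl] at hpe2
      have hlen : (strFindall t x 0 (p : Int)).length = done.length + 1 := by
        have hsplit' : pvG t x 0 = (done ++ [q]) ++ pvG t x (q + x.length) := by
          rw [hsplit, hrest]
          simp
        have := pvLenSplit t x p hx hp (done ++ [q]) (pvG t x (q + x.length)) hsplit'
          (by
            intro q' hq'
            rcases List.mem_append.mp hq' with h | h
            · have := hdone q' h; omega
            · simp at h; subst h; omega)
          (by
            intro hd' hh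
            rw [hqe] at hh
            cases hnx : nextOcc t x p with
            | none => rw [pvG_eq_none t x p hx hnx] at hh; simp at hh
            | some q3 =>
              rw [pvG_eq_some t x p q3 hx hnx] at hh
              simp at hh
              rcases pvNextOccSome t x p q3 hnx with ⟨hh1, _, _, _⟩
              omega)
        rw [this]
        simp
      constructor
      · rw [hlen, ← hpar1, hpar, pvParityFlip]
      · have hdone1 : ∀ q' ∈ done ++ [q], q' + x.length < p + 1 := by
          intro q' hq'
          rcases List.mem_append.mp hq' with h | h
          · have := hdone q' h; omega
          · simp at h; subst h; omega
        have hpar1' : par1 = decide ((done ++ [q]).length % 2 = 1) := by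
          rw [← hpar1, hpar]
          simp only [List.length_append, List.length_cons, List.length_nil]
          rcases Nat.mod_two_eq_zero_or_one done.length with h | h <;> simp [Nat.add_mod, h]
        by_cases hocc : x.isPrefixOf (t.drop p)
        · have hoccp : x <+: t.drop p := List.isPrefixOf_iff_prefix.mp hocc
          rw [hocc] at hpe2
          simp at hpe2
          refine ⟨done ++ [q], pvG t x p, by rw [hsplit, hrest, hqe]; simp, hdone1, hpar1', ?_⟩
          right
          refine ⟨p, hpe2.symm, by omega, by omega, ?_⟩
          exact pvG_eq_some t x p p hx (pvNextOccSelf t x p hp hoccp)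
        · have hpre : x.isPrefixOf (t.drop p) = false := Bool.eq_false_iff.mpr hocc
          rw [hpre] at hpe2
          simp at hpe2
          refine ⟨done ++ [q], pvG t x p, by rw [hsplit, hrest, hqe]; simp, hdone1, hpar1', ?_⟩
          left
          refine ⟨hpe2.symm, p, by omega, rfl, ?_⟩
          intro r h1 h2
          have : r = p := by omega
          subst this
          exact fun hc => hocc (List.isPrefixOf_iff_prefix.mpr hc)
    · -- strictly inside the match: p < q + |x|
      have hpne : ¬ (pe = (p : Int)) := by
        rw [hpe]
        intro hc
        have : q + x.length = p := by exact_mod_cast hc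
        exact hqe this
      rw [if_neg hpne] at hpar1 hpe2
      have hpen : ¬ (pe = -1) := by rw [hpe]; omega
      rw [if_neg (by simp [hpen])] at hpe2
      have hlen : (strFindall t x 0 (p : Int)).length = done.length := by
        apply pvLenSplit t x p hx hp done rest hsplit (fun q' hq' => by have := hdone q' hq'; omega)
        intro hd' hh
        rw [hrest] at hh
        simp at hh
        subst hh
        omega
      constructor
      · rw [hlen, ← hpar1, hpar, pvParitySame]
      · refine ⟨done, rest, hsplit, fun q' hq' => by have := hdone q' hq'; omega, by rw [← hpar1, hpar], ?_⟩
        right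
        exact ⟨q, by rw [← hpe2, hpe], by omega, by omega, hrest⟩


-- ---- main loop alignment, equal-bracket case ------------------------------------

theorem pvMainEq (t x b : List Char) (Struc : List String)
    (ho : (PySem.List.pyGetD Struc 0 "").toList = x)
    (hc : (PySem.List.pyGetD Struc 1 "").toList = x)
    (hx : x ≠ []) :
    ∀ (k p : Nat) (par : Bool) (pe : Int) (nb fA : Nat),
      p + k = t.length + 1 →
      EqInv t x p par pe →
      (∀ q : Nat, nb ≤ q → q < p → ¬ b <+: t.drop q) →
      (b = [] → nb = 0) →
      k + 1 ≤ fA →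
      scanEq t x b k p par pe nb = boundGo t b Struc fA (PySem.Chars.findFrom t b (nb : Int) none) := by
  intro k
  induction k with
  | zero =>
    intro p par pe nb fA hpk _ h3 _ hfA
    have hfind : PySem.Chars.findFrom t b (nb : Int) none = -1 := by
      rw [pvFindFromNoneEval]
      exact pvFindFromSomeNone t b nb t.length (le_refl _)
        (fun q hq hqe => h3 q hq (by omega))
    obtain ⟨f, rfl⟩ : ∃ f, fA = f + 1 := ⟨fA - 1, by omega⟩
    rw [hfind]
    simp [scanEq, boundGo]
  | succ k ih =>
    intro p par pe nb fA hpk hinv h3 h5 hfA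
    have hp : p ≤ t.length := by omega
    simp only [scanEq]
    generalize hP1 : (if pe = (p : Int) then !par else par) = par1
    generalize hP2 : (if (decide ((if pe = (p : Int) then -1 else pe) = -1) && x.isPrefixOf (List.drop p t)) = true
        then ((p + x.length : Nat) : Int) else (if pe = (p : Int) then -1 else pe)) = pe2
    obtain ⟨hparval, hinv'⟩ := pvStepEq t x p par pe hx hp hinv par1 pe2 hP1 hP2
    have hchk : inStrucCheck t (p : Int) Struc = par1 := by
      unfold inStrucCheck
      simp only [ho, hc]
      rw [if_neg (by simp)]
      exact hparval
    by_cases hcand : (decide (nb ≤ p) && b.isPrefixOf (t.drop p)) = true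
    · have hcand' := hcand
      simp only [Bool.and_eq_true, decide_eq_true_eq] at hcand'
      obtain ⟨hnbp, hoccb0⟩ := hcand'
      have hoccb : b <+: t.drop p := List.isPrefixOf_iff_prefix.mp hoccb0
      have hple : p + b.length ≤ t.length := by
        by_cases hbnil : b = []
        · subst hbnil; simpa using hp
        · exact pvOccEnd t b p hbnil hoccb
      have hfind : PySem.Chars.findFrom t b (nb : Int) none = (p : Int) := by
        rw [pvFindFromNoneEval]
        exact pvFindFromSomeEq t b nb t.length p (le_refl _) hnbp hoccb hple
          (fun r hr hrq => h3 r hr (by omega))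
      obtain ⟨f, rfl⟩ : ∃ f, fA = f + 1 := ⟨fA - 1, by omega⟩
      rw [hfind]
      simp only [boundGo]
      rw [if_pos (by omega : ¬ ((p : Int) = -1)), hchk, if_pos hcand]
      by_cases hin : par1 = true
      · rw [if_pos hin]
        have hbne : b ≠ [] := by
          intro hbnil
          have hnb0 : nb = 0 := h5 hbnil
          have hp0 : p = 0 := by
            by_contra hpne
            exact h3 0 (by omega) (by omega) (by simp [hbnil])
          subst hp0
          have hl : (strFindall t x 0 ((0 : Nat) : Int)).length = 0 := by
            rw [pvStrFindallLen t x 0 hx (by omega)]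
            rcases pvGTakeLen t x 0 hx (t.length + 1) 0 (by omega) with hle | h0 <;> omega
          rw [hl] at hparval
          simp at hparval
          rw [hparval] at hin
          cases hin
        have hbpos : 0 < b.length := List.length_pos_iff.mpr hbne
        rw [if_neg (by simp [hin])]
        have hcast : ((p : Int) + (b.length : Int)) = ((p + b.length : Nat) : Int) := by push_cast; ring
        rw [hcast]
        exact ih (p+1) par1 pe2 (p + b.length) f (by omega) hinv'
          (fun q hq hq' => by intro _; omega)
          (fun hbnil => absurd hbnil hbne) (by omega)
      · rw [if_neg hin, Bool.eq_false_iff.mpr hin]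
        simp
    · rw [if_neg hcand]
      have h3' : ∀ q : Nat, nb ≤ q → q < p + 1 → ¬ b <+: t.drop q := by
        intro q hq hq'
        rcases Nat.lt_or_ge q p with hlt | hge
        · exact h3 q hq hlt
        · have hqp : q = p := by omega
          subst hqp
          intro hpre
          exact hcand (by simp [hq, List.isPrefixOf_iff_prefix.mpr hpre])
      exact ih (p+1) par1 pe2 nb fA (by omega) hinv' h3' h5 (by omega)

-- ---- assembly -------------------------------------------------------------------

theorem pvToListNe (s : String) (h : s ≠ "") : s.toList ≠ [] := by
  intro hnil
  apply h
  cases s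
  simp_all

-- ===== VERDICT (by name: the statement is the Claim_ definition above) =====
theorem bound_find_spec : Claim_equal_bound_find := by
  unfold Claim_equal_bound_find
  intro obj Struc bound_str _ hpre
  unfold Spec_bound_find bound_find bound_find_alt
  by_cases hf : PySem.Chars.find obj.toList bound_str.toList = -1
  · rw [if_neg (not_not.mpr hf), if_pos hf]
  · rcases hpre with hfs | ⟨_, hor⟩
    · exfalso
      apply hf
      have := PySem.Str.find_eq obj bound_str
      omega
    · rw [if_pos hf, if_neg hf]
      by_cases hne : (PySem.List.pyGetD Struc 0 "").toList ≠ (PySem.List.pyGetD Struc 1 "").toList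
      · rw [if_pos hne]
        have hob : bound_str.toList = [] → (PySem.List.pyGetD Struc 0 "").toList ≠ [] := by
          intro hbnil
          rcases hor with h | ⟨hb, _⟩
          · exact pvToListNe _ h
          · exfalso
            apply pvToListNe _ hb
            exact hbnil
        have hmain := pvMainNe obj.toList (PySem.List.pyGetD Struc 0 "").toList
          (PySem.List.pyGetD Struc 1 "").toList bound_str.toList Struc rfl rfl hne hob
          (obj.toList.length + 1) 0 (-1) (-1) 0 (obj.toList.length + 2) (by omega)
          (pvLastInvZero _ _) (pvLastInvZero _ _)
          (fun q _ hq => by omega) (fun _ => rfl) (by omega)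
        have hz : PySem.Chars.findFrom obj.toList bound_str.toList ((0 : Nat) : Int) none =
            PySem.Chars.find obj.toList bound_str.toList := by
          simpa using PySem.Chars.findFrom_zero obj.toList bound_str.toList
        rw [hz] at hmain
        exact hmain.symm
      · rw [if_neg hne]
        have hxeq : (PySem.List.pyGetD Struc 1 "").toList = (PySem.List.pyGetD Struc 0 "").toList :=
          (not_ne_iff.mp hne).symm
        have hx : (PySem.List.pyGetD Struc 0 "").toList ≠ [] := by
          rcases hor with h | ⟨_, hcs⟩
          · exact pvToListNe _ h
          · rw [← hxeq]
            exact pvToListNe _ hcs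
        have hmain := pvMainEq obj.toList (PySem.List.pyGetD Struc 0 "").toList
          bound_str.toList Struc rfl hxeq hx
          (obj.toList.length + 1) 0 false (-1) 0 (obj.toList.length + 2) (by omega)
          (pvEqInvZero _ _)
          (fun q _ hq => by omega) (fun _ => rfl) (by omega)
        have hz : PySem.Chars.findFrom obj.toList bound_str.toList ((0 : Nat) : Int) none =
            PySem.Chars.find obj.toList bound_str.toList := by
          simpa using PySem.Chars.findFrom_zero obj.toList bound_str.toList
        rw [hz] at hmain
        exact hmain.symm
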